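-- pv_equiv track=rewrite | github.com/aannaazh/topic_topwords_sim | sim_parallel.py | _get_valid_spans
-- ===== SOURCE A (Python) =====
-- def _get_valid_spans(text, word_map, max_w_len):
--     """预计算有效词跨度，每句话只调用一次"""
--     L = len(text)
--     valid_spans = []
--     for i in range(L):
--         for l in range(1, min(max_w_len, L - i) + 1):
--             w = text[i : i + l]
--             if w in word_map:
--                 valid_spans.append((i, i + l, word_map[w]))
--     return valid_spans, L
-- ===== SOURCE B (Python) =====
-- def _get_valid_spans(text, word_map, max_w_len):
--     L = len(text)
--     # word-list scan: keep only usable words once, then try each word at each position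
--     words = [(w, t) for w, t in word_map.items() if 1 <= len(w) <= max_w_len]
--     spans = []
--     for i in range(L):
--         hits = [(i, i + len(w), t) for w, t in words if text[i:i + len(w)] == w]
--         hits.sort(key=lambda s: s[1])
--         spans.extend(hits)
--     return spans, L
-- ===== Notes on version B (the rewrite author's own statement) =====
-- stated objective: alternative
-- what changed: A probes the dict with every substring of each length 1..max_w_len at each position; B filters the word list by length once, tests each remaining word at each position by direct slice comparison, and sorts each position's hits by end index.
import Mathlib
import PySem

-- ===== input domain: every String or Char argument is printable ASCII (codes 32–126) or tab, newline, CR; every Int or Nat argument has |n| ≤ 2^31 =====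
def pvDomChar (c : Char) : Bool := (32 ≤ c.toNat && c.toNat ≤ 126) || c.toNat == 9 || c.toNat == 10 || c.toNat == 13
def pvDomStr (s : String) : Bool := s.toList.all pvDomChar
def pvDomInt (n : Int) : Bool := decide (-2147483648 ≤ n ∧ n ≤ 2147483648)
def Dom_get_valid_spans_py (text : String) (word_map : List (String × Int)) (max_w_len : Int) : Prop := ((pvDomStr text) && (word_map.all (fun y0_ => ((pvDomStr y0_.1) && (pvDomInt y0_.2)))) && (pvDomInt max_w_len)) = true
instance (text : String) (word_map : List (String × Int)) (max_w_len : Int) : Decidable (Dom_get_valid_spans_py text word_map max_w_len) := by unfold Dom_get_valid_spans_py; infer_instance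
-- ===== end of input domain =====

-- B replaces A's per-position substring-hash probing (every length 1..max_w_len against the dict)
-- by a scan of the usable word list at each position, sorting each position's hits by end index;
-- objective: alternative (a genuinely different traversal; not measured faster).

-- ===== PORT A =====
-- The Python dict word_map is keyed by str; the port keys it by the word's character
-- list (String equality coincides with char-list equality), so slices compare directly.
def get_valid_spans_py (text : String) (word_map : List (String × Int)) (max_w_len : Int) : (List (Int × Int × Int)) × Int :=
  let cs := text.toList
  let d : PySem.Dict (List Char) Int := PySem.Dict.ofList (word_map.map (fun p => (p.1.toList, p.2)))
  let L : Int := cs.length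
  let spans := (PySem.List.pyRange 0 L).foldl (fun acc i =>
    (PySem.List.pyRange 1 (min max_w_len (L - i) + 1)).foldl (fun acc2 l =>
      match d.get? (PySem.List.slice cs (some i) (some (i + l))) with
      | some v => acc2 ++ [(i, i + l, v)]
      | none => acc2) acc) []
  (spans, L)

-- ===== PORT B =====
def get_valid_spans_py_alt (text : String) (word_map : List (String × Int)) (max_w_len : Int) : (List (Int × Int × Int)) × Int :=
  let cs := text.toList
  let L : Int := cs.length
  let words := (PySem.Dict.ofList (word_map.map (fun p => (p.1.toList, p.2)))).items.filter
      (fun p => decide (1 ≤ (p.1.length : Int) ∧ (p.1.length : Int) ≤ max_w_len))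
  let spans := (PySem.List.pyRange 0 L).foldl (fun acc i =>
    acc ++ PySem.List.sorted
      (words.filterMap (fun p =>
        if PySem.List.slice cs (some i) (some (i + (p.1.length : Int))) = p.1
        then some (i, i + (p.1.length : Int), p.2) else none))
      (fun s => s.2.1)) []
  (spans, L)

-- ===== PRECONDITION & SPEC =====
def Spec_get_valid_spans_py (text : String) (word_map : List (String × Int)) (max_w_len : Int) (out : (List (Int × Int × Int)) × Int) : Prop := out = get_valid_spans_py_alt text word_map max_w_len
instance (text : String) (word_map : List (String × Int)) (max_w_len : Int) (out : (List (Int × Int × Int)) × Int) : Decidable (Spec_get_valid_spans_py text word_map max_w_len out) := by unfold Spec_get_valid_spans_py; infer_instance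

-- ===== CLAIM (what is proved, stated in full; the proofs are below) =====
def Claim_equal_get_valid_spans_py : Prop := ∀ (text : String) (word_map : List (String × Int)) (max_w_len : Int), Dom_get_valid_spans_py text word_map max_w_len → Spec_get_valid_spans_py text word_map max_w_len (get_valid_spans_py text word_map max_w_len)

-- ===== LEMMAS AND PROOFS =====

-- A's inner loop, as a filterMap over the length range
def pvInnerA (cs : List Char) (d : PySem.Dict (List Char) Int) (mx i : Int) : List (Int × Int × Int) :=
  (PySem.List.pyRange 1 (min mx ((cs.length : Int) - i) + 1)).filterMap
    (fun l => (d.get? (PySem.List.slice cs (some i) (some (i + l)))).map (fun v => (i, i + l, v)))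

-- B's per-position hit list
def pvHitsB (cs : List Char) (ws : List (List Char × Int)) (i : Int) : List (Int × Int × Int) :=
  ws.filterMap (fun p =>
    if PySem.List.slice cs (some i) (some (i + (p.1.length : Int))) = p.1
    then some (i, i + (p.1.length : Int), p.2) else none)

-- A's inner 'if w in word_map: …append…' loop, as a filterMap
theorem pv_innerA_foldl (cs : List Char) (d : PySem.Dict (List Char) Int) (i : Int)
    (xs : List Int) (acc : List (Int × Int × Int)) :
    xs.foldl (fun acc2 l =>
      match d.get? (PySem.List.slice cs (some i) (some (i + l))) with
      | some v => acc2 ++ [(i, i + l, v)]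
      | none => acc2) acc
    = acc ++ xs.filterMap (fun l =>
        (d.get? (PySem.List.slice cs (some i) (some (i + l)))).map (fun v => (i, i + l, v))) := by
  induction xs generalizing acc with
  | nil => simp
  | cons x xs ih =>
    cases hg : d.get? (PySem.List.slice cs (some i) (some (i + x))) <;>
      simp [List.foldl_cons, hg, ih]

theorem pvA_eq (text : String) (word_map : List (String × Int)) (mx : Int) :
    get_valid_spans_py text word_map mx =
      ((PySem.List.pyRange 0 (text.toList.length : Int)).flatMap
        (pvInnerA text.toList (PySem.Dict.ofList (word_map.map (fun p => (p.1.toList, p.2)))) mx),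
       (text.toList.length : Int)) := by
  simp only [get_valid_spans_py]
  refine Prod.ext ?_ rfl
  exact Eq.trans
    (PySem.List.foldl_congr_mem _ _
      (fun acc i => acc ++ pvInnerA text.toList
        (PySem.Dict.ofList (word_map.map (fun p => (p.1.toList, p.2)))) mx i) _
      (fun acc i _ => pv_innerA_foldl text.toList
        (PySem.Dict.ofList (word_map.map (fun p => (p.1.toList, p.2)))) i _ acc))
    (by rw [PySem.List.foldl_append_eq_flatMap]; rfl)

theorem pvB_eq (text : String) (word_map : List (String × Int)) (mx : Int) :
    get_valid_spans_py_alt text word_map mx =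
      ((PySem.List.pyRange 0 (text.toList.length : Int)).flatMap
        (fun i => PySem.List.sorted
          (pvHitsB text.toList
            ((PySem.Dict.ofList (word_map.map (fun p => (p.1.toList, p.2)))).items.filter
              (fun p => decide (1 ≤ (p.1.length : Int) ∧ (p.1.length : Int) ≤ mx))) i)
          (fun s => s.2.1)),
       (text.toList.length : Int)) := by
  simp only [get_valid_spans_py_alt]
  refine Prod.ext ?_ rfl
  rw [PySem.List.foldl_append_eq_flatMap]
  rfl

theorem pv_inner_pairwise (cs : List Char) (d : PySem.Dict (List Char) Int) (mx i : Int) :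
    (pvInnerA cs d mx i).Pairwise (fun a b => a.2.1 < b.2.1) := by
  unfold pvInnerA
  rw [List.pairwise_filterMap]
  refine (PySem.List.pairwise_lt_pyRange_one 1 _).imp ?_
  intro l l' hll' b hb b' hb'
  obtain ⟨v, _, rfl⟩ := Option.map_eq_some_iff.1 hb
  obtain ⟨v', _, rfl⟩ := Option.map_eq_some_iff.1 hb'
  simpa using hll' 

theorem pv_inner_nodup (cs : List Char) (d : PySem.Dict (List Char) Int) (mx i : Int) :
    (pvInnerA cs d mx i).Nodup := by
  refine (pv_inner_pairwise cs d mx i).imp ?_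
  intro a b h he
  subst he
  exact lt_irrefl _ h

theorem pv_mem_iff (cs : List Char) (wm : List (List Char × Int)) (mx i : Int)
    (hi0 : 0 ≤ i) (hiL : i < (cs.length : Int)) (x : Int × Int × Int) :
    x ∈ pvInnerA cs (PySem.Dict.ofList wm) mx i ↔
      x ∈ pvHitsB cs ((PySem.Dict.ofList wm).items.filter
        (fun p => decide (1 ≤ (p.1.length : Int) ∧ (p.1.length : Int) ≤ mx))) i := by
  have hkeys : (PySem.Dict.ofList wm).keys.Nodup := PySem.Dict.nodup_keys_ofList wm
  unfold pvInnerA pvHitsB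
  simp only [List.mem_filterMap, PySem.List.mem_pyRange_one, Option.map_eq_some_iff,
    List.mem_filter, decide_eq_true_eq]
  constructor
  · rintro ⟨l, ⟨h1, h2⟩, v, hget, rfl⟩
    have hl_mx : l ≤ mx := by omega
    have hl_Li : l ≤ (cs.length : Int) - i := by omega
    obtain ⟨k, rfl⟩ : ∃ k : Nat, i = (k : Int) := ⟨i.toNat, (Int.toNat_of_nonneg hi0).symm⟩
    obtain ⟨m, rfl⟩ : ∃ m : Nat, l = (m : Int) := ⟨l.toNat, (Int.toNat_of_nonneg (by omega)).symm⟩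
    have hslice : PySem.List.slice cs (some (k : Int)) (some ((k : Int) + (m : Int)))
        = (cs.drop k).take m := PySem.List.slice_natCast_add cs k m
    have hlen : ((cs.drop k).take m).length = m := by
      simp only [List.length_take, List.length_drop]
      omega
    refine ⟨((cs.drop k).take m, v), ⟨?_, ?_⟩, ?_⟩
    · exact (PySem.Dict.get?_eq_some_iff_mem_items _ _ _ hkeys).1 (hslice ▸ hget)
    · rw [hlen]; omega
    · simp [hlen, hslice]
  · rintro ⟨⟨w, v⟩, ⟨hmem, hlen1, hlenmx⟩, hx⟩
    dsimp only at hlen1 hlenmx hx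
    by_cases hc : PySem.List.slice cs (some i) (some (i + (w.length : Int))) = w
    case neg => simp [hc] at hx
    rw [if_pos hc] at hx
    obtain ⟨k, rfl⟩ : ∃ k : Nat, i = (k : Int) := ⟨i.toNat, (Int.toNat_of_nonneg hi0).symm⟩
    have hslice : PySem.List.slice cs (some (k : Int)) (some ((k : Int) + (w.length : Int)))
        = (cs.drop k).take w.length := PySem.List.slice_natCast_add cs k w.length
    have hle : w.length ≤ cs.length - k := by
      have := congrArg List.length hc
      rw [hslice] at this
      simp only [List.length_take, List.length_drop] at this
      omega
    refine ⟨(w.length : Int), ⟨by omega, by omega⟩, v, ?_, ?_⟩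
    · rw [hc]
      exact (PySem.Dict.get?_eq_some_iff_mem_items _ _ _ hkeys).2 hmem
    · exact Option.some_inj.mp hx

theorem pv_hits_nodup (cs : List Char) (wm : List (List Char × Int)) (mx i : Int) :
    (pvHitsB cs ((PySem.Dict.ofList wm).items.filter
        (fun p => decide (1 ≤ (p.1.length : Int) ∧ (p.1.length : Int) ≤ mx))) i).Nodup := by
  have hk := PySem.Dict.nodup_keys_ofList wm
  simp only [PySem.Dict.keys] at hk
  have hitems : ((PySem.Dict.ofList wm).items).Nodup := List.Nodup.of_map _ hk
  unfold pvHitsB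
  refine List.Nodup.filterMap ?_ (hitems.filter _)
  intro p p' b hb hb'
  by_cases hc : PySem.List.slice cs (some i) (some (i + (p.1.length : Int))) = p.1
  case neg => simp [hc] at hb
  by_cases hc' : PySem.List.slice cs (some i) (some (i + (p'.1.length : Int))) = p'.1
  case neg => simp [hc'] at hb'
  rw [if_pos hc] at hb
  rw [if_pos hc'] at hb'
  simp only [Option.mem_def, Option.some_inj] at hb hb'
  have hb2 := hb.trans hb'.symm
  have hlen : p.1.length = p'.1.length := by
    have h21 : i + (p.1.length : Int) = i + (p'.1.length : Int) :=
      congrArg (fun t => t.2.1) hb2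
    omega
  have h1 : p.1 = p'.1 := by rw [← hc, ← hc', hlen]
  have h2 : p.2 = p'.2 := congrArg (fun t => t.2.2) hb2

  exact Prod.ext h1 h2

theorem pv_inner_eq_sorted (cs : List Char) (wm : List (List Char × Int)) (mx i : Int)
    (hi0 : 0 ≤ i) (hiL : i < (cs.length : Int)) :
    PySem.List.sorted
      (pvHitsB cs ((PySem.Dict.ofList wm).items.filter
        (fun p => decide (1 ≤ (p.1.length : Int) ∧ (p.1.length : Int) ≤ mx))) i)
      (fun s => s.2.1)
      = pvInnerA cs (PySem.Dict.ofList wm) mx i := by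
  apply PySem.List.sorted_eq_of_perm_of_pairwise_lt
  · exact (List.perm_ext_iff_of_nodup (pv_inner_nodup ..) (pv_hits_nodup cs wm mx i)).2
      (pv_mem_iff cs wm mx i hi0 hiL)
  · exact pv_inner_pairwise ..

-- ===== VERDICT (by name: the statement is the Claim_ definition above) =====
theorem get_valid_spans_py_spec : Claim_equal_get_valid_spans_py := by
  intro text word_map mx _
  unfold Spec_get_valid_spans_py
  rw [pvA_eq, pvB_eq]
  refine Prod.ext ?_ rfl
  apply List.flatMap_congr
  intro i hi
  have h := PySem.List.mem_pyRange_one.mp hi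
  exact (pv_inner_eq_sorted text.toList _ mx i h.1 h.2).symm
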